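-- pv_equiv track=rewrite | github.com/pypi-data/pypi-mirror-231 | packages/game-base/game_base-0.0.3-py3-none-any.whl/game_base/base/game/base/logic/mahjong_utils.py | check_lug_rogue
-- ===== SOURCE A (Python) =====
-- def contain_size(cardlist, card):
--     """
--     :包含数量
--     :param cardlist:
--     :param card:
--     :return:
--     """
--     size = 0
--     for c in cardlist:
--         if c == card:
--             size += 1
--     return size
--
-- def check_lug(handlist):
--     """
--     :胡牌规则
--     :param handlist:
--     :return:
--     """
--     if 0 == len(handlist):
--         return True
--     temp = list()
--     temp.extend(handlist)
--     md_val = temp[0]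
--     temp.remove(md_val)
--     if 2 == contain_size(temp, md_val):
--         temp_same = list()
--         temp_same.extend(temp)
--         temp_same.remove(md_val)
--         temp_same.remove(md_val)
--         if check_lug(temp_same):
--             return True
--     if md_val + 1 in temp and md_val + 2 in temp:
--         temp_shun = list()
--         temp_shun.extend(temp)
--         temp_shun.remove(md_val + 1)
--         temp_shun.remove(md_val + 2)
--         if check_lug(temp_shun):
--             return True
--     return False
--
-- def check_lug_rogue(handlist, rogue_count):
--     """
--     :胡牌规则
--     :param handlist:
--     :param rogue_count:
--     :return:
--     """
--     if 0 == len(handlist):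
--         return True
--     if 0 == rogue_count:
--         return check_lug(handlist)
--     temp = list()
--     temp.extend(handlist)
--     md_val = temp[0]
--     temp.remove(md_val)
--     if 2 == contain_size(temp, md_val):
--         temp_same = list()
--         temp_same.extend(temp)
--         temp_same.remove(md_val)
--         temp_same.remove(md_val)
--         if check_lug_rogue(temp_same, rogue_count):
--             return True
--     if md_val + 1 in temp and md_val + 2 in temp:
--         temp_shun = list()
--         temp_shun.extend(temp)
--         temp_shun.remove(md_val + 1)
--         temp_shun.remove(md_val + 2)
--         if check_lug_rogue(temp_shun, rogue_count):
--             return True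
--     if rogue_count > 0:
--         if 1 == contain_size(temp, md_val):
--             temp_same = list()
--             temp_same.extend(temp)
--             temp_same.remove(md_val)
--             if check_lug_rogue(temp_same, rogue_count - 1):
--                 return True
--         if md_val + 1 in temp:
--             temp_same = list()
--             temp_same.extend(temp)
--             temp_same.remove(md_val + 1)
--             if check_lug_rogue(temp_same, rogue_count - 1):
--                 return True
--         if md_val + 2 in temp and md_val % 10 != 9:
--             temp_same = list()
--             temp_same.extend(temp)
--             temp_same.remove(md_val + 2)
--             if check_lug_rogue(temp_same, rogue_count - 1):
--                 return True
--         if 1 < rogue_count: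
--             if check_lug_rogue(temp, rogue_count - 2):
--                 return True
--     return False
-- ===== SOURCE B (Python) =====
-- def check_lug_rogue(handlist, rogue_count):
--     cache = {}
--
--     def go(hand, r):
--         if not hand:
--             return True
--         key = (hand, r)
--         if key in cache:
--             return cache[key]
--         md = hand[0]
--         temp = hand[1:]
--         cands = []
--         if temp.count(md) == 2:
--             t = list(temp)
--             t.remove(md)
--             t.remove(md)
--             cands.append((tuple(t), r))
--         if md + 1 in temp and md + 2 in temp:
--             t = list(temp)
--             t.remove(md + 1)
--             t.remove(md + 2)
--             cands.append((tuple(t), r))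
--         if r > 0:
--             if temp.count(md) == 1:
--                 t = list(temp)
--                 t.remove(md)
--                 cands.append((tuple(t), r - 1))
--             if md + 1 in temp:
--                 t = list(temp)
--                 t.remove(md + 1)
--                 cands.append((tuple(t), r - 1))
--             if md + 2 in temp and md % 10 != 9:
--                 t = list(temp)
--                 t.remove(md + 2)
--                 cands.append((tuple(t), r - 1))
--             if r > 1:
--                 cands.append((temp, r - 2))
--         res = any(go(h, k) for (h, k) in cands)
--         cache[key] = res
--         return res
--
--     return go(tuple(handlist), rogue_count)
-- ===== Notes on version B (the rewrite author's own statement) =====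
-- stated objective: alternative
-- what changed: B memoizes the recursion on the state (remaining hand, rogue count) with an explicit cache dict and drives each step from a built list of candidate reductions instead of A's inline branch chain; repeated states are solved once.
import Mathlib
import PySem

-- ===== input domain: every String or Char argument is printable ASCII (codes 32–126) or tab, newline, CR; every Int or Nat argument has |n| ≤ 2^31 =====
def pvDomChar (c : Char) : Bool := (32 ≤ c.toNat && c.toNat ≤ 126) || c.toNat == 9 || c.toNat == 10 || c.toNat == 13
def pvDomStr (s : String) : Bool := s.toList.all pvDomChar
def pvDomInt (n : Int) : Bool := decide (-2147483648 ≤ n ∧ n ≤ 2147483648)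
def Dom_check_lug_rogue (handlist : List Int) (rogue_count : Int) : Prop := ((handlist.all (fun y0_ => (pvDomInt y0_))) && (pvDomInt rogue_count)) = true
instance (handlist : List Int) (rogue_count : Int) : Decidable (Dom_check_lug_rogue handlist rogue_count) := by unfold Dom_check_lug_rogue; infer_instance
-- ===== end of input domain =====

-- B restructures A's exhaustive branch-chain recursion: it collects the candidate
-- reductions of a state (remaining hand, rogue count) into a list, recurses over that
-- list, and memoizes results in an explicit cache keyed on the state (objective:
-- alternative; each distinct state is solved once).

-- Python's list.remove(v); every use in both programs is guarded (v is known to be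
-- present), so the `none` branch of PySem.List.remove? is unreachable and `.getD []`
-- is exact.
def pvRemove (l : List Int) (v : Int) : List Int := (PySem.List.remove? l v).getD []

-- length bound cited by the termination proofs of both ports
theorem pvRemove_length_le (l : List Int) (v : Int) : (pvRemove l v).length ≤ l.length := by
  unfold pvRemove
  by_cases h : v ∈ l
  · rw [PySem.List.remove?_eq_some_erase l v h]
    simp only [Option.getD_some]
    exact List.length_erase_le
  · rw [(PySem.List.remove?_eq_none_iff l v).mpr h]
    simp

-- ===== PORT A =====
def contain_size (cardlist : List Int) (card : Int) : Int :=
  cardlist.foldl (fun size c => if c == card then size + 1 else size) 0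

def check_lug (handlist : List Int) : Bool :=
  match handlist with
  | [] => true
  | md_val :: temp =>
    -- temp = handlist copy with temp[0] (= md_val) removed: removing the first
    -- occurrence of the head is exactly dropping the head (PySem.List.remove?_cons_self)
    (if contain_size temp md_val = 2 then
        check_lug (pvRemove (pvRemove temp md_val) md_val)
      else false)
    || (if temp.contains (md_val + 1) && temp.contains (md_val + 2) then
        check_lug (pvRemove (pvRemove temp (md_val + 1)) (md_val + 2))
      else false)
termination_by handlist.length
decreasing_by
  · have h1 := pvRemove_length_le (pvRemove temp md_val) md_val
    have h2 := pvRemove_length_le temp md_val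
    simp; omega
  · have h1 := pvRemove_length_le (pvRemove temp (md_val + 1)) (md_val + 2)
    have h2 := pvRemove_length_le temp (md_val + 1)
    simp; omega

def check_lug_rogue (handlist : List Int) (rogue_count : Int) : Bool :=
  match handlist with
  | [] => true
  | md_val :: temp =>
    if rogue_count = 0 then check_lug (md_val :: temp)
    else
      (if contain_size temp md_val = 2 then
          check_lug_rogue (pvRemove (pvRemove temp md_val) md_val) rogue_count
        else false)
      || (if temp.contains (md_val + 1) && temp.contains (md_val + 2) then
          check_lug_rogue (pvRemove (pvRemove temp (md_val + 1)) (md_val + 2)) rogue_count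
        else false)
      || (if rogue_count > 0 then
            (if contain_size temp md_val = 1 then
                check_lug_rogue (pvRemove temp md_val) (rogue_count - 1)
              else false)
            || (if temp.contains (md_val + 1) then
                check_lug_rogue (pvRemove temp (md_val + 1)) (rogue_count - 1)
              else false)
            || (if temp.contains (md_val + 2) ∧ PySem.Int.mod md_val 10 ≠ 9 then
                check_lug_rogue (pvRemove temp (md_val + 2)) (rogue_count - 1)
              else false)
            || (if 1 < rogue_count then check_lug_rogue temp (rogue_count - 2) else false)
          else false)
termination_by handlist.length
decreasing_by
  · have h1 := pvRemove_length_le (pvRemove temp md_val) md_val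
    have h2 := pvRemove_length_le temp md_val
    simp; omega
  · have h1 := pvRemove_length_le (pvRemove temp (md_val + 1)) (md_val + 2)
    have h2 := pvRemove_length_le temp (md_val + 1)
    simp; omega
  · have h1 := pvRemove_length_le temp md_val
    simp; omega
  · have h1 := pvRemove_length_le temp (md_val + 1)
    simp; omega
  · have h1 := pvRemove_length_le temp (md_val + 2)
    simp; omega
  · simp

-- ===== PORT B =====
-- the candidate reductions Source B collects in `cands` (same insertion order)
def pvCands (md : Int) (temp : List Int) (r : Int) : List (List Int × Int) :=
  (if temp.count md = 2 then [(pvRemove (pvRemove temp md) md, r)] else [])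
  ++ (if temp.contains (md + 1) && temp.contains (md + 2) then
        [(pvRemove (pvRemove temp (md + 1)) (md + 2), r)] else [])
  ++ (if r > 0 then
        (if temp.count md = 1 then [(pvRemove temp md, r - 1)] else [])
        ++ (if temp.contains (md + 1) then [(pvRemove temp (md + 1), r - 1)] else [])
        ++ (if temp.contains (md + 2) ∧ PySem.Int.mod md 10 ≠ 9 then
              [(pvRemove temp (md + 2), r - 1)] else [])
        ++ (if 1 < r then [(temp, r - 2)] else [])
      else [])

-- length bound cited by pvGo's termination proof
theorem pvCands_length_le (md : Int) (temp : List Int) (r : Int) :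
    ∀ p ∈ pvCands md temp r, p.1.length ≤ temp.length := by
  intro p hp
  unfold pvCands at hp
  have h1 := pvRemove_length_le (pvRemove temp md) md
  have h2 := pvRemove_length_le temp md
  have h3 := pvRemove_length_le (pvRemove temp (md + 1)) (md + 2)
  have h4 := pvRemove_length_le temp (md + 1)
  have h5 := pvRemove_length_le temp (md + 2)
  simp only [List.mem_append, List.mem_ite_nil_right, List.mem_singleton] at hp
  rcases hp with (⟨-, h⟩ | ⟨-, h⟩) | ⟨-, ((⟨-, h⟩ | ⟨-, h⟩) | ⟨-, h⟩) | ⟨-, h⟩⟩ <;>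
    rw [h] <;> dsimp only <;> omega

-- Source B's `go`, threading the cache explicitly (Python mutates a dict in a closure)
def pvGo (hand : List Int) (r : Int) (c : PySem.Dict (List Int × Int) Bool) :
    Bool × PySem.Dict (List Int × Int) Bool :=
  match hand with
  | [] => (true, c)
  | md :: temp =>
    match c.get? (md :: temp, r) with
    | some v => (v, c)
    | none =>
      let res := (pvCands md temp r).attach.foldl
        (fun acc p => if acc.1 then acc else pvGo p.1.1 p.1.2 acc.2) (false, c)
      (res.1, res.2.insert (md :: temp, r) res.1)
termination_by hand.length
decreasing_by
  have := pvCands_length_le md temp r p.1 p.2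
  simp; omega

def check_lug_rogue_alt (handlist : List Int) (rogue_count : Int) : Bool :=
  (pvGo handlist rogue_count PySem.Dict.empty).1

-- ===== PRECONDITION & SPEC =====
def Spec_check_lug_rogue (handlist : List Int) (rogue_count : Int) (out : Bool) : Prop := out = check_lug_rogue_alt handlist rogue_count
instance (handlist : List Int) (rogue_count : Int) (out : Bool) : Decidable (Spec_check_lug_rogue handlist rogue_count out) := by unfold Spec_check_lug_rogue; infer_instance

-- ===== CLAIM (what is proved, stated in full; the proofs are below) =====
def Claim_equal_check_lug_rogue : Prop := ∀ (handlist : List Int) (rogue_count : Int), Dom_check_lug_rogue handlist rogue_count → Spec_check_lug_rogue handlist rogue_count (check_lug_rogue handlist rogue_count)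

-- ===== LEMMAS AND PROOFS =====

theorem contain_size_eq_count (l : List Int) (v : Int) : contain_size l v = (l.count v : Int) := by
  simpa [contain_size] using PySem.List.foldl_beq_add_one l v 0

theorem contain_size_two (l : List Int) (v : Int) :
    (contain_size l v = 2) = (l.count v = 2) := by
  rw [contain_size_eq_count]
  exact propext ⟨fun h => by exact_mod_cast h, fun h => by exact_mod_cast h⟩

theorem contain_size_one (l : List Int) (v : Int) :
    (contain_size l v = 1) = (l.count v = 1) := by
  rw [contain_size_eq_count]
  exact propext ⟨fun h => by exact_mod_cast h, fun h => by exact_mod_cast h⟩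

theorem check_lug_eq_rogue_zero (l : List Int) : check_lug l = check_lug_rogue l 0 := by
  cases l with
  | nil => rw [check_lug, check_lug_rogue]
  | cons md temp => rw [check_lug_rogue]; simp

theorem any_ite_singleton {α : Type} {c : Prop} [Decidable c] (x : α) (f : α → Bool) :
    (if c then [x] else []).any f = if c then f x else false := by
  split_ifs <;> simp

-- A's branch chain IS the disjunction over B's candidate list
theorem checkA_cons (md : Int) (temp : List Int) (r : Int) :
    check_lug_rogue (md :: temp) r
      = (pvCands md temp r).any (fun p => check_lug_rogue p.1 p.2) := by
  by_cases hr : r = 0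
  · subst hr
    rw [check_lug_rogue]
    rw [check_lug]
    have h0 : ¬ ((0 : Int) > 0) := by omega
    simp only [pvCands, List.any_append, any_ite_singleton, contain_size_two,
      check_lug_eq_rogue_zero, if_neg h0, List.any_nil, Bool.or_false, ite_self]
  · rw [check_lug_rogue]
    simp only [if_neg hr, pvCands, List.any_append, any_ite_singleton,
      contain_size_two, contain_size_one]
    by_cases h : r > 0
    · simp only [if_pos h, List.any_append, any_ite_singleton, Bool.or_assoc]
    · simp only [if_neg h, List.any_nil, Bool.or_assoc]

-- cache invariant: every stored value is the (A-)answer for its key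
def pvGood (c : PySem.Dict (List Int × Int) Bool) : Prop :=
  ∀ k v, c.get? k = some v → v = check_lug_rogue k.1 k.2

theorem pvGood_empty : pvGood PySem.Dict.empty := by
  intro k v h
  simp [PySem.Dict.empty, PySem.Dict.get?] at h

theorem pvFoldl_go (n : Nat)
    (IH : ∀ hand r c, hand.length ≤ n → pvGood c →
      (pvGo hand r c).1 = check_lug_rogue hand r ∧ pvGood (pvGo hand r c).2) :
    ∀ (cs : List (List Int × Int)), (∀ p ∈ cs, p.1.length ≤ n) →
    ∀ (acc : Bool × PySem.Dict (List Int × Int) Bool), pvGood acc.2 →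
      (cs.attach.foldl (fun acc p => if acc.1 then acc else pvGo p.1.1 p.1.2 acc.2) acc).1
        = (acc.1 || cs.any (fun p => check_lug_rogue p.1 p.2))
      ∧ pvGood (cs.attach.foldl (fun acc p => if acc.1 then acc else pvGo p.1.1 p.1.2 acc.2) acc).2 := by
  intro cs
  induction cs with
  | nil => intro _ acc hacc; simpa using hacc
  | cons p cs ih =>
    intro hlen acc hacc
    have hp : p.1.length ≤ n := hlen p (List.mem_cons_self ..)
    have hcs : ∀ q ∈ cs, q.1.length ≤ n := fun q hq => hlen q (List.mem_cons_of_mem _ hq)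
    simp only [List.attach_cons, List.foldl_cons, List.foldl_map, List.any_cons]
    by_cases hb : acc.1
    · have : (if acc.1 then acc else pvGo p.1 p.2 acc.2) = acc := by simp [hb]
      rw [this]
      have := ih hcs acc hacc
      simp [this.1, this.2, hb]
    · have : (if acc.1 then acc else pvGo p.1 p.2 acc.2) = pvGo p.1 p.2 acc.2 := by simp [hb]
      rw [this]
      have hgo := IH p.1 p.2 acc.2 hp hacc
      have := ih hcs (pvGo p.1 p.2 acc.2) hgo.2
      simp [this.1, this.2, hb, hgo.1]

theorem pvGo_correct : ∀ (n : Nat) (hand : List Int) (r : Int)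
    (c : PySem.Dict (List Int × Int) Bool), hand.length ≤ n → pvGood c →
    (pvGo hand r c).1 = check_lug_rogue hand r ∧ pvGood (pvGo hand r c).2 := by
  intro n
  induction n with
  | zero =>
    intro hand r c hlen hc
    have : hand = [] := List.length_eq_zero_iff.mp (Nat.le_zero.mp hlen)
    subst this
    simpa [pvGo, check_lug_rogue] using hc
  | succ n ihn =>
    intro hand r c hlen hc
    match hand with
    | [] => simpa [pvGo, check_lug_rogue] using hc
    | md :: temp =>
      rw [pvGo]
      cases hget : c.get? (md :: temp, r) with
      | some v =>
        exact ⟨hc _ _ hget, hc⟩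
      | none =>
        simp only []
        have htlen : temp.length ≤ n := by simpa using hlen
        have hbound : ∀ p ∈ pvCands md temp r, p.1.length ≤ n :=
          fun p hp => le_trans (pvCands_length_le md temp r p hp) htlen
        have hIH : ∀ hand' r' c', hand'.length ≤ n → pvGood c' →
            (pvGo hand' r' c').1 = check_lug_rogue hand' r' ∧ pvGood (pvGo hand' r' c').2 :=
          fun hand' r' c' h hc' => ihn hand' r' c' h hc'
        have hf := pvFoldl_go n hIH (pvCands md temp r) hbound (false, c) hc
        set res := (pvCands md temp r).attach.foldl
          (fun acc p => if acc.1 then acc else pvGo p.1.1 p.1.2 acc.2) (false, c) with hres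
        have h1 : res.1 = check_lug_rogue (md :: temp) r := by
          rw [hf.1, checkA_cons]; simp
        refine ⟨h1, ?_⟩
        intro k v hkv
        rw [PySem.Dict.get?_insert] at hkv
        by_cases hk : k = (md :: temp, r)
        · rw [if_pos hk] at hkv
          cases hkv
          rw [hk, h1]
        · rw [if_neg hk] at hkv
          exact hf.2 k v hkv

-- ===== VERDICT (by name: the statement is the Claim_ definition above) =====
theorem check_lug_rogue_spec : Claim_equal_check_lug_rogue := by
  intro handlist rogue_count _
  unfold Spec_check_lug_rogue check_lug_rogue_alt
  exact (pvGo_correct handlist.length handlist rogue_count PySem.Dict.empty le_rfl pvGood_empty).1.symm
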